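-- pv_equiv track=rewrite | github.com/Tatiana020/Lym-Proy-0 | parser/codigo.py | leer_condicion
-- ===== SOURCE A (Python) =====
-- cardinales = ["#north", "#south", "#west", "#east"]
--
-- chips = [ "#ballons", "#chips"]
--
-- directions =["#north", "#south", "#west", "#east"]
--
-- def leer_condicion(linea):
--     tokens = linea.split(" ")
--     if len(tokens) == 3 and tokens[0] in ["facing:", "canMove:"] and tokens[2] == ".":
--         if tokens[0] == "facing:" and tokens[1] in cardinales:
--             return True
--         if tokens[0] == "canMove:" and tokens[1].isdigit():
--             return True
--     elif len(tokens) == 5 and tokens[0] in ["canPut:", "canPick:", "canMove:", "canJump:"] and tokens[2] == "ofType:" and tokens[4] == ".":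
--         if tokens[0] in ["canPut:", "canPick:"] and tokens[3] in chips:
--             return True
--         if tokens[0] in ["canMove:", "canJump:"] and tokens[3] in cardinales:
--             return True
--     elif len(tokens) == 5 and tokens[0] in ["canMove:", "canJump:"] and tokens[2] == "toThe:" and tokens[4] == ".":
--         if tokens[3] in directions:
--             return True
--     elif len(tokens) == 3 and tokens[0] == "not:":
--         return leer_condicion(" ".join(tokens[1:]))
--     return False
-- ===== SOURCE B (Python) =====
-- CARDINALES = frozenset(["#north", "#south", "#west", "#east"])
-- CHIPS = frozenset(["#ballons", "#chips"])
--
-- # grammar table: (token count, leading keywords, fixed tokens at positions, allowed values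
-- # for the argument token at position n-2; None means "must be a digit string")
-- RULES = [
--     (3, ("facing:",), {2: "."}, CARDINALES),
--     (3, ("canMove:",), {2: "."}, None),
--     (5, ("canPut:", "canPick:"), {2: "ofType:", 4: "."}, CHIPS),
--     (5, ("canMove:", "canJump:"), {2: "ofType:", 4: "."}, CARDINALES),
--     (5, ("canMove:", "canJump:"), {2: "toThe:", 4: "."}, CARDINALES),
-- ]
--
--
-- def leer_condicion(linea):
--     tokens = linea.split(" ")
--     return any(
--         len(tokens) == n
--         and tokens[0] in kws
--         and all(tokens[i] == sep for i, sep in fixed.items())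
--         and (tokens[n - 2].isdigit() if values is None else tokens[n - 2] in values)
--         for n, kws, fixed, values in RULES
--     )
-- ===== Notes on version B (the rewrite author's own statement) =====
-- stated objective: idiomatic
-- what changed: Replaces A's hand-written if/elif cascade (with its dead 'not:' recursion) by a declarative grammar table of rule records (token count, leading keywords, fixed separator positions, allowed value set or digit test) checked with a single any() dispatch over the split token list.
import Mathlib
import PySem

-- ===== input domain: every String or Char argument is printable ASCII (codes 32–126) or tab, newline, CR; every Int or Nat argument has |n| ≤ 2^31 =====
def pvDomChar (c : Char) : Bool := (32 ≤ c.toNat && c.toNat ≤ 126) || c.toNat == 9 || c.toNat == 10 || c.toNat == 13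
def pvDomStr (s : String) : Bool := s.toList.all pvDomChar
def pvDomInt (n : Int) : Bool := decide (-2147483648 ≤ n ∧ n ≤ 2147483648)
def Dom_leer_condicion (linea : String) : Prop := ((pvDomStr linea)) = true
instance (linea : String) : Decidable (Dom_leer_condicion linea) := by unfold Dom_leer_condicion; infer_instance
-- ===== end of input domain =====

-- B replaces A's hand-written if/elif cascade by a grammar table dispatched over the token list
-- (objective: idiomatic / table-driven decomposition); same return value on every input.

-- ===== PORT A =====
def cardinales : List String := ["#north", "#south", "#west", "#east"]
def chips : List String := ["#ballons", "#chips"]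
def directions : List String := ["#north", "#south", "#west", "#east"]

-- linea.split(" ") with the literal nonempty separator " " is exactly Chars.splitOn on code points
def pySplitSpace (linea : String) : List String :=
  (PySem.Chars.splitOn linea.toList [' ']).map String.ofList

-- fuel (string length, strictly decreasing under the "not:" re-join) only makes A's recursion
-- structurally total; the 0 case is never reached from leer_condicion's initial fuel
def leerGo : Nat → String → Bool
  | 0, _ => false
  | fuel+1, linea =>
    let tokens := pySplitSpace linea
    if tokens.length = 3 && (["facing:", "canMove:"].contains (tokens.getD 0 "")) && tokens.getD 2 "" == "." then
      if tokens.getD 0 "" == "facing:" && cardinales.contains (tokens.getD 1 "") then true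
      else if tokens.getD 0 "" == "canMove:" && PySem.Str.strIsdigit (tokens.getD 1 "") then true
      else false
    else if tokens.length = 5 && (["canPut:", "canPick:", "canMove:", "canJump:"].contains (tokens.getD 0 "")) && tokens.getD 2 "" == "ofType:" && tokens.getD 4 "" == "." then
      if ["canPut:", "canPick:"].contains (tokens.getD 0 "") && chips.contains (tokens.getD 3 "") then true
      else if ["canMove:", "canJump:"].contains (tokens.getD 0 "") && cardinales.contains (tokens.getD 3 "") then true
      else false
    else if tokens.length = 5 && (["canMove:", "canJump:"].contains (tokens.getD 0 "")) && tokens.getD 2 "" == "toThe:" && tokens.getD 4 "" == "." then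
      if directions.contains (tokens.getD 3 "") then true
      else false
    else if tokens.length = 3 && tokens.getD 0 "" == "not:" then
      leerGo fuel (PySem.Str.join " " (tokens.drop 1))
    else false

def leer_condicion (linea : String) : Bool := leerGo (linea.toList.length + 1) linea

-- ===== PORT B =====
-- grammar table: (token count, leading keywords, fixed tokens at positions,
--  allowed values for the argument token at position n-2; none = "must be a digit string")
def pvRules : List (Nat × List String × List (Nat × String) × Option (List String)) :=
  [ (3, ["facing:"], [(2, ".")], some ["#north", "#south", "#west", "#east"]),
    (3, ["canMove:"], [(2, ".")], none),
    (5, ["canPut:", "canPick:"], [(2, "ofType:"), (4, ".")], some ["#ballons", "#chips"]),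
    (5, ["canMove:", "canJump:"], [(2, "ofType:"), (4, ".")], some ["#north", "#south", "#west", "#east"]),
    (5, ["canMove:", "canJump:"], [(2, "toThe:"), (4, ".")], some ["#north", "#south", "#west", "#east"]) ]

def leer_condicion_alt (linea : String) : Bool :=
  let tokens := pySplitSpace linea
  pvRules.any (fun r =>
    tokens.length = r.1
    && r.2.1.contains (tokens.getD 0 "")
    && r.2.2.1.all (fun is => tokens.getD is.1 "" == is.2)
    && (match r.2.2.2 with
        | none => PySem.Str.strIsdigit (tokens.getD (r.1 - 2) "")
        | some vs => vs.contains (tokens.getD (r.1 - 2) "")))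

-- ===== PRECONDITION & SPEC =====
def Spec_leer_condicion (linea : String) (out : Bool) : Prop := out = leer_condicion_alt linea
instance (linea : String) (out : Bool) : Decidable (Spec_leer_condicion linea out) := by unfold Spec_leer_condicion; infer_instance

-- ===== CLAIM (what is proved, stated in full; the proofs are below) =====
def Claim_equal_leer_condicion : Prop := ∀ (linea : String), Dom_leer_condicion linea → Spec_leer_condicion linea (leer_condicion linea)

-- ===== LEMMAS AND PROOFS =====

-- PySem's fuelled splitOn on a one-character separator is Mathlib's List.splitOn
theorem pvGo_eq (c : Char) : ∀ (fuel : Nat) (l cur : List Char) (acc : List (List Char)) (_ : l.length < fuel),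
    PySem.Chars.splitOn.go [c] fuel l cur acc
      = acc.reverse ++ (l.splitOn c).modifyHead (cur.reverse ++ ·) := by
  intro fuel
  induction fuel with
  | zero => intro l cur acc h; omega
  | succ n ih =>
    intro l cur acc h
    cases l with
    | nil => simp [PySem.Chars.splitOn.go.eq_def, List.splitOn, List.splitOnP, List.splitOnP.go]
    | cons x rest =>
      rw [PySem.Chars.splitOn.go.eq_def]
      by_cases hx : x = c
      · subst hx
        simp only [List.isPrefixOf, BEq.rfl, Bool.true_and, if_true,
          List.length_cons, List.length_nil, List.drop_succ_cons, List.drop_zero]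
        rw [ih rest [] (cur.reverse :: acc) (by simpa using Nat.lt_of_succ_lt_succ h)]
        simp [List.splitOn, List.splitOnP_cons]
        exact congrFun List.modifyHead_id _
      · have hpre : [c].isPrefixOf (x :: rest) = false := by
          simp only [List.isPrefixOf, Bool.and_true, beq_eq_false_iff_ne, ne_eq]
          exact fun hcx => hx hcx.symm
        simp only [hpre, Bool.false_eq_true, if_false]
        rw [ih rest (x :: cur) acc (by simpa using Nat.lt_of_succ_lt_succ h)]
        have hne := List.splitOnP_ne_nil (fun y => y == c) rest
        simp only [List.splitOn, List.splitOnP_cons, beq_iff_eq, hx, if_false]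
        cases hsp : List.splitOnP (fun y => y == c) rest with
        | nil => exact absurd hsp hne
        | cons hd tl => simp

theorem pvSplitOn_char (s : List Char) (c : Char) :
    PySem.Chars.splitOn s [c] = s.splitOn c := by
  rw [PySem.Chars.splitOn, pvGo_eq c (s.length + 1) s [] [] (Nat.lt_succ_self _)]
  have hne := List.splitOnP_ne_nil (fun y => y == c) s
  simp only [List.splitOn] at *
  cases hsp : List.splitOnP (fun y => y == c) s with
  | nil => exact absurd hsp hne
  | cons hd tl => simp

-- pieces produced by List.splitOn never contain the separator
theorem pvNot_mem_splitOn (c : Char) : ∀ (s p : List Char), p ∈ s.splitOn c → c ∉ p := by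
  intro s
  induction s with
  | nil =>
    intro p hp
    simp [List.splitOn, List.splitOnP, List.splitOnP.go] at hp
    simp [hp]
  | cons x rest ih =>
    intro p hp
    by_cases hx : x = c
    · subst hx
      rw [List.splitOn, List.splitOnP_cons] at hp
      simp only [BEq.rfl, if_true, List.mem_cons] at hp
      rcases hp with hp | hp
      · simp [hp]
      · exact ih p hp
    · rw [List.splitOn, List.splitOnP_cons] at hp
      simp only [beq_iff_eq, hx, if_false] at hp
      have hne := List.splitOnP_ne_nil (fun y => y == c) rest
      cases hsp : List.splitOnP (fun y => y == c) rest with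
      | nil => exact absurd hsp hne
      | cons hd tl =>
        rw [hsp] at hp
        simp only [List.modifyHead, List.mem_cons] at hp
        rcases hp with hp | hp
        · subst hp
          intro hcmem
          rcases List.mem_cons.mp hcmem with hc1 | hc1
          · exact hx hc1.symm
          · exact ih hd (by rw [List.splitOn, hsp]; exact List.mem_cons_self ..) hc1
        · exact ih p (by rw [List.splitOn, hsp]; exact List.mem_cons_of_mem _ hp)

-- the string A re-joins in the "not:" branch splits back into exactly its two tokens
theorem pvSplit_join_two (b c : List Char) (hb : ' ' ∉ b) (hc : ' ' ∉ c) :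
    pySplitSpace (PySem.Str.join " " [String.ofList b, String.ofList c])
      = [String.ofList b, String.ofList c] := by
  rw [pySplitSpace]
  have h1 : (PySem.Str.join " " [String.ofList b, String.ofList c]).toList
      = [' '].intercalate [b, c] := by
    simp [PySem.Str.join, PySem.Chars.join, String.toList_ofList]
  rw [h1, pvSplitOn_char,
    List.splitOn_intercalate [b, c] ' '
      (by intro l hl; rcases List.mem_pair.mp hl with rfl | rfl; exacts [hb, hc]) (by simp)]
  simp

-- a two-token line satisfies neither A's branches nor any table rule
theorem pvGo_two (n : Nat) (b c : List Char) (hb : ' ' ∉ b) (hc : ' ' ∉ c) :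
    leerGo n (PySem.Str.join " " [String.ofList b, String.ofList c]) = false := by
  cases n with
  | zero => rfl
  | succ m =>
    rw [leerGo]
    simp only [pvSplit_join_two b c hb hc]
    simp

theorem pvMain (fuel : Nat) (linea : String) :
    leerGo (fuel + 1) linea = leer_condicion_alt linea := by
  rw [leerGo, leer_condicion_alt]
  have hpieces : ∀ p ∈ linea.toList.splitOn ' ', ' ' ∉ p :=
    fun p hp => pvNot_mem_splitOn ' ' linea.toList p hp
  have hsp : pySplitSpace linea = (linea.toList.splitOn ' ').map String.ofList := by
    rw [pySplitSpace, pvSplitOn_char]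
  rcases hts : linea.toList.splitOn ' ' with _ | ⟨a, _ | ⟨b, _ | ⟨c, _ | ⟨d, _ | ⟨e, rest⟩⟩⟩⟩⟩
  · rw [hts] at hsp; simp [hsp, pvRules]
  · rw [hts] at hsp; simp [hsp, pvRules]
  · rw [hts] at hsp; simp [hsp, pvRules]
  · -- three tokens
    rw [hts] at hsp hpieces
    by_cases hnot : String.ofList a = "not:"
    · have hb : ' ' ∉ b := hpieces b (by simp)
      have hc : ' ' ∉ c := hpieces c (by simp)
      simp only [hsp]
      simp [pvRules, hnot, pvGo_two fuel b c hb hc]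
    · simp only [hsp]
      by_cases h1 : String.ofList a = "facing:" <;>
        by_cases h2 : String.ofList a = "canMove:" <;>
          simp_all [pvRules, cardinales, beq_eq_decide]
  · rw [hts] at hsp; simp [hsp, pvRules]
  · -- five or more tokens
    rw [hts] at hsp
    cases rest with
    | nil =>
      simp only [hsp]
      by_cases h1 : String.ofList a = "canPut:" <;>
        by_cases h2 : String.ofList a = "canPick:" <;>
          by_cases h3 : String.ofList a = "canMove:" <;>
            by_cases h4 : String.ofList a = "canJump:" <;>
              by_cases h5 : String.ofList c = "ofType:" <;>
                by_cases h6 : String.ofList c = "toThe:" <;>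
                  simp_all [pvRules, cardinales, chips, directions, beq_eq_decide]
    | cons f rest' => simp [hsp, pvRules]

-- ===== VERDICT (by name: the statement is the Claim_ definition above) =====
theorem leer_condicion_spec : Claim_equal_leer_condicion := by
  intro linea _
  unfold Spec_leer_condicion leer_condicion
  exact pvMain linea.toList.length linea
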